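-- pv_equiv track=rewrite | github.com/natgluons/HiringHelp-Chatbot | app.py | chunk_text
-- ===== SOURCE A (Python) =====
-- def chunk_text(text, max_length=50):
--     """Split text into chunks at sentence boundaries"""
--     sentences = []
--     current_sentence = []
--
--     for word in text.split():
--         current_sentence.append(word)
--         if word.endswith(('.', '!', '?', '...')):
--             sentences.append(' '.join(current_sentence))
--             current_sentence = []
--
--     if current_sentence:
--         sentences.append(' '.join(current_sentence))
--
--     chunks = []
--     current_chunk = []
--     current_length = 0
--
--     for sentence in sentences:
--         sentence_length = len(sentence.split())
--         if current_length + sentence_length > max_length and current_chunk: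
--             chunk_text = ' '.join(current_chunk)
--             if not chunk_text.strip().endswith('.'):
--                 chunk_text = chunk_text.rstrip('.!?') + '.'
--             chunks.append(chunk_text)
--             current_chunk = []
--             current_length = 0
--
--         current_chunk.append(sentence)
--         current_length += sentence_length
--
--     if current_chunk:
--         chunk_text = ' '.join(current_chunk)
--         if not chunk_text.strip().endswith('.'):
--             chunk_text = chunk_text.rstrip('.!?') + '.'
--         chunks.append(chunk_text)
--
--     return chunks
-- ===== SOURCE B (Python) =====
-- def _norm(s):
--     if not s.strip().endswith('.'):
--         s = s.rstrip('.!?') + '.'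
--     return s
--
--
-- def chunk_text(text, max_length=50):
--     """Index-based chunking: find sentence-end word indices, then emit chunks
--     as slices of the word list directly (no intermediate sentence strings)."""
--     words = text.split()
--     ends = [i + 1 for i, w in enumerate(words) if w.endswith(('.', '!', '?'))]
--     if len(words) != 0 and (not ends or ends[-1] != len(words)):
--         ends.append(len(words))
--     chunks = []
--     start = prev = count = 0
--     for e in ends:
--         if count != 0 and count + (e - prev) > max_length:
--             chunks.append(_norm(' '.join(words[start:prev])))
--             start, count = prev, 0
--         count += e - prev
--         prev = e
--     if words:
--         chunks.append(_norm(' '.join(words[start:])))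
--     return chunks
-- ===== Notes on version B (the rewrite author's own statement) =====
-- stated objective: alternative
-- what changed: B never builds sentence strings: it computes the word-index positions of sentence ends with one enumerate pass, then walks those indices with start/prev/count counters and emits each chunk directly as a slice words[start:prev] of the word list, whereas A materialises a sentences list of joined strings and re-splits each sentence to count its words.
import Mathlib
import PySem

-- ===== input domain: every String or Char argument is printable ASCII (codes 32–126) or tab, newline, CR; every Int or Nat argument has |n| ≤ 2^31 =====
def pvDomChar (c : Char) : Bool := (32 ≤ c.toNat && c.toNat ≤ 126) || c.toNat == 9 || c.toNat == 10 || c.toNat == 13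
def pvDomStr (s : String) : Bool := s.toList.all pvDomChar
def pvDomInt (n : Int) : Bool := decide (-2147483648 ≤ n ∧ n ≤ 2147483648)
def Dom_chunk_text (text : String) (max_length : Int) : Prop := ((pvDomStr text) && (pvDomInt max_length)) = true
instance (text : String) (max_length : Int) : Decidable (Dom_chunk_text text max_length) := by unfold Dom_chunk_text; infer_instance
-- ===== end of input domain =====

-- B re-implements A's chunking without building sentence strings: it computes sentence-end
-- WORD INDICES (one enumerate pass) and emits every chunk as a slice of the word list;
-- objective: alternative algorithm (index arithmetic instead of string assembly), same cost.


-- ===== PORT A =====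

-- hand port of s.rstrip('.!?') (PySem has no rstrip-with-chars primitive): exact —
-- removes exactly the trailing characters among '.', '!', '?'
def ctRstripPunct (s : String) : String :=
  String.ofList ((s.toList.reverse.dropWhile (fun c => c == '.' || c == '!' || c == '?')).reverse)

-- the chunk-normalisation code that appears verbatim at A's two flush sites
def ctFinalizeA (chunk : List String) : String :=
  let s := PySem.Str.join " " chunk
  if !(PySem.Str.endswith (PySem.Str.strip s) ".") then ctRstripPunct s ++ "." else s

-- body of A's first loop: accumulate words into current_sentence, emit on sentence end
def ctSentStepA (st : List String × List String) (word : String) : List String × List String :=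
  let current_sentence := st.2 ++ [word]
  if PySem.Str.endswith word "." || PySem.Str.endswith word "!" ||
     PySem.Str.endswith word "?" || PySem.Str.endswith word "..." then
    (st.1 ++ [PySem.Str.join " " current_sentence], [])
  else
    (st.1, current_sentence)

-- body of A's second loop over sentences (chunks, current_chunk, current_length)
def ctPackStepA (max_length : Int) (st : List String × List String × Int) (sentence : String) :
    List String × List String × Int :=
  let sentence_length : Int := ((PySem.Str.split₀ sentence).length : Int)
  if st.2.2 + sentence_length > max_length && !st.2.1.isEmpty then
    (st.1 ++ [ctFinalizeA st.2.1], [sentence], sentence_length)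
  else
    (st.1, st.2.1 ++ [sentence], st.2.2 + sentence_length)

def chunk_text (text : String) (max_length : Int) : List String :=
  let p := (PySem.Str.split₀ text).foldl ctSentStepA ([], [])
  let sentences := if !p.2.isEmpty then p.1 ++ [PySem.Str.join " " p.2] else p.1
  let q := sentences.foldl (ctPackStepA max_length) ([], [], 0)
  if !q.2.1.isEmpty then q.1 ++ [ctFinalizeA q.2.1] else q.1

-- ===== PORT B =====

-- Source B's _norm helper
def ctNorm (s : String) : String :=
  if !(PySem.Str.endswith (PySem.Str.strip s) ".") then ctRstripPunct s ++ "." else s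

-- Source B's sentence-end test w.endswith(('.', '!', '?'))
def ctP (w : String) : Bool :=
  PySem.Str.endswith w "." || PySem.Str.endswith w "!" || PySem.Str.endswith w "?"

-- body of Source B's loop over the end indices; state = (chunks, start, prev, count)
def ctBStep (words : List String) (max_length : Int)
    (st : List String × Int × Int × Int) (e : Int) : List String × Int × Int × Int :=
  if !(st.2.2.2 == 0) && decide (st.2.2.2 + (e - st.2.2.1) > max_length) then
    (st.1 ++ [ctNorm (PySem.Str.join " " (PySem.List.slice words (some st.2.1) (some st.2.2.1)))],
     st.2.2.1, e, e - st.2.2.1)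
  else
    (st.1, st.2.1, e, st.2.2.2 + (e - st.2.2.1))

def chunk_text_alt (text : String) (max_length : Int) : List String :=
  let words := PySem.Str.split₀ text
  let ends0 := ((PySem.List.enumerate words 0).filter (fun p => ctP p.2)).map (fun p => p.1 + 1)
  -- Python: 'if len(words) != 0 and (not ends or ends[-1] != len(words)): ends.append(len(words))'
  let ends := if !(PySem.List.len words == 0) &&
      (ends0.isEmpty || !(PySem.List.pyGet? ends0 (-1) == some (PySem.List.len words)))
    then ends0 ++ [PySem.List.len words] else ends0
  let st := ends.foldl (ctBStep words max_length) ([], 0, 0, 0)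
  if !words.isEmpty then
    st.1 ++ [ctNorm (PySem.Str.join " " (PySem.List.slice words (some st.2.1) none))]
  else st.1

-- ===== PRECONDITION & SPEC =====
def Spec_chunk_text (text : String) (max_length : Int) (out : List String) : Prop := out = chunk_text_alt text max_length
instance (text : String) (max_length : Int) (out : List String) : Decidable (Spec_chunk_text text max_length out) := by unfold Spec_chunk_text; infer_instance

-- ===== CLAIM (what is proved, stated in full; the proofs are below) =====
def Claim_equal_chunk_text : Prop := ∀ (text : String) (max_length : Int), Dom_chunk_text text max_length → Spec_chunk_text text max_length (chunk_text text max_length)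

-- ===== LEMMAS AND PROOFS =====

-- the sentence groups (lists of consecutive words) A's first loop produces, as word lists
def ctGroupsAux : List String → List String → List (List String)
  | cs, [] => if cs.isEmpty then [] else [cs]
  | cs, w :: ws => if ctP w then (cs ++ [w]) :: ctGroupsAux [] ws else ctGroupsAux (cs ++ [w]) ws

-- cumulative end indices of the groups, starting at word index k
def ctCum (k : Nat) : List (List String) → List Int
  | [] => []
  | g :: gs => ((k + g.length : Nat) : Int) :: ctCum (k + g.length) gs

-- a word ending in "..." also ends in ".", so A's four-way test equals B's three-way test ctP
lemma ctEnds_eq (w : String) :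
    (PySem.Str.endswith w "." || PySem.Str.endswith w "!" ||
     PySem.Str.endswith w "?" || PySem.Str.endswith w "...") = ctP w := by
  by_cases h : PySem.Str.endswith w "..." = true
  · have h1 : PySem.Str.endswith w "." = true := by
      simp only [PySem.Str.endswith_eq, PySem.Chars.endswith_iff] at h ⊢
      exact List.IsSuffix.trans (by decide) h
    unfold ctP; rw [h, h1]; simp
  · rw [Bool.not_eq_true] at h
    unfold ctP; rw [h]; simp

-- A's first loop, finished off, yields exactly the joined groups
lemma sentFold (ws : List String) : ∀ (acc cs : List String),
    (let r := ws.foldl ctSentStepA (acc, cs);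
     if !r.2.isEmpty then r.1 ++ [PySem.Str.join " " r.2] else r.1)
      = acc ++ (ctGroupsAux cs ws).map (PySem.Str.join " ") := by
  induction ws with
  | nil =>
    intro acc cs
    by_cases h : cs.isEmpty <;> simp_all [ctGroupsAux]
  | cons w ws ih =>
    intro acc cs
    simp only [List.foldl_cons, ctSentStepA, ctEnds_eq, ctGroupsAux]
    by_cases h : ctP w = true
    · simp only [h, if_true]
      rw [ih]
      simp
    · rw [Bool.not_eq_true] at h
      simp only [h, Bool.false_eq_true, if_false]
      rw [ih]

lemma groupsAux_flatten (ws : List String) : ∀ cs, (ctGroupsAux cs ws).flatten = cs ++ ws := by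
  induction ws with
  | nil => intro cs; by_cases h : cs.isEmpty <;> simp_all [ctGroupsAux]
  | cons w ws ih =>
    intro cs
    simp only [ctGroupsAux]
    by_cases h : ctP w = true
    · simp [h, ih]
    · rw [Bool.not_eq_true] at h
      simp [h, ih]

lemma groupsAux_ne_nil (ws : List String) : ∀ cs g, g ∈ ctGroupsAux cs ws → g ≠ [] := by
  induction ws with
  | nil =>
    intro cs g hg
    by_cases h : cs.isEmpty <;> simp_all [ctGroupsAux]
  | cons w ws ih =>
    intro cs g hg
    simp only [ctGroupsAux] at hg
    by_cases h : ctP w = true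
    · simp only [h, if_true, List.mem_cons] at hg
      rcases hg with rfl | hg
      · simp
      · exact ih [] g hg
    · rw [Bool.not_eq_true] at h
      simp only [h, Bool.false_eq_true, if_false] at hg
      exact ih (cs ++ [w]) g hg

lemma groupsAux_mem (ws : List String) : ∀ cs g w', g ∈ ctGroupsAux cs ws → w' ∈ g → w' ∈ cs ∨ w' ∈ ws := by
  induction ws with
  | nil =>
    intro cs g w' hg hw
    by_cases h : cs.isEmpty <;> simp_all [ctGroupsAux]
  | cons w ws ih =>
    intro cs g w' hg hw
    simp only [ctGroupsAux] at hg
    by_cases h : ctP w = true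
    · simp only [h, if_true, List.mem_cons] at hg
      rcases hg with rfl | hg
      · simp only [List.mem_append, List.mem_singleton] at hw
        rcases hw with hw | hw
        · exact Or.inl hw
        · exact Or.inr (by simp [hw])
      · rcases ih [] g w' hg hw with h' | h'
        · simp at h'
        · exact Or.inr (List.mem_cons_of_mem _ h')
    · rw [Bool.not_eq_true] at h
      simp only [h, Bool.false_eq_true, if_false] at hg
      rcases ih (cs ++ [w]) g w' hg hw with h' | h'
      · simp only [List.mem_append, List.mem_singleton] at h'
        rcases h' with h' | h'
        · exact Or.inl h'
        · exact Or.inr (by simp [h'])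
      · exact Or.inr (List.mem_cons_of_mem _ h')

-- words produced by Python's str.split() are nonempty and contain no whitespace
lemma split0_go_words (s : List Char) : ∀ (cur : List Char) (acc : List (List Char)),
    (∀ c ∈ cur, PySem.Chars.isspace c = false) →
    (∀ w ∈ acc, w ≠ [] ∧ ∀ c ∈ w, PySem.Chars.isspace c = false) →
    ∀ w ∈ PySem.Chars.split₀.go s cur acc, w ≠ [] ∧ ∀ c ∈ w, PySem.Chars.isspace c = false := by
  induction s with
  | nil =>
    intro cur acc hcur hacc w hw
    rw [PySem.Chars.split₀.go.eq_def] at hw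
    by_cases h : cur.isEmpty
    · simp only [h, if_true, List.mem_reverse] at hw
      exact hacc w hw
    · simp only [h, Bool.false_eq_true, if_false, List.mem_reverse, List.mem_cons] at hw
      rcases hw with rfl | hw
      · constructor
        · simpa using fun h' => h (by simp [h'])
        · intro c hc; exact hcur c (by simpa using hc)
      · exact hacc w hw
  | cons c rest ih =>
    intro cur acc hcur hacc w hw
    rw [PySem.Chars.split₀.go.eq_def] at hw
    by_cases hsp : PySem.Chars.isspace c = true
    · simp only [hsp, if_true] at hw
      by_cases hc : cur.isEmpty
      · simp only [hc, if_true] at hw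
        exact ih [] acc (by simp) hacc w hw
      · simp only [hc, Bool.false_eq_true, if_false] at hw
        refine ih [] (cur.reverse :: acc) (by simp) ?_ w hw
        intro w' hw'
        rcases List.mem_cons.1 hw' with rfl | hw'
        · constructor
          · simpa using fun h' => hc (by simp [h'])
          · intro c' hc'; exact hcur c' (by simpa using hc')
        · exact hacc w' hw'
    · rw [Bool.not_eq_true] at hsp
      simp only [hsp, Bool.false_eq_true, if_false] at hw
      refine ih (c :: cur) acc ?_ hacc w hw
      intro c' hc'
      rcases List.mem_cons.1 hc' with rfl | hc'
      · exact hsp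
      · exact hcur c' hc'

lemma split0_words (s : String) :
    ∀ w ∈ PySem.Str.split₀ s, w ≠ "" ∧ ∀ c ∈ w.toList, PySem.Chars.isspace c = false := by
  intro w hw
  simp only [PySem.Str.split₀, List.mem_map] at hw
  obtain ⟨l, hl, rfl⟩ := hw
  have := split0_go_words s.toList [] [] (by simp) (by simp) l hl
  refine ⟨?_, ?_⟩
  · intro h
    exact this.1 (by simpa using congrArg String.toList h)
  · intro c hc
    exact this.2 c (by simpa using hc)

-- intercalate facts this Mathlib version does not provide under these names
lemma ic_singleton (sep x : List Char) : List.intercalate sep [x] = x := by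
  simp [List.intercalate]

lemma ic_cons₂ (sep x y : List Char) (l : List (List Char)) :
    List.intercalate sep (x :: y :: l) = x ++ sep ++ List.intercalate sep (y :: l) := by
  simp [List.intercalate, List.intersperse]

-- split₀.go scans past a whitespace-free block by accumulating it
lemma go_skip (w : List Char) : ∀ (cs cur : List Char) (acc : List (List Char)),
    (∀ c ∈ w, PySem.Chars.isspace c = false) →
    PySem.Chars.split₀.go (w ++ cs) cur acc = PySem.Chars.split₀.go cs (w.reverse ++ cur) acc := by
  induction w with
  | nil => intro cs cur acc _; simp
  | cons c w ih =>
    intro cs cur acc h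
    rw [List.cons_append, PySem.Chars.split₀.go.eq_def]
    have hc : PySem.Chars.isspace c = false := h c (by simp)
    simp only [hc, Bool.false_eq_true, if_false]
    rw [ih cs (c :: cur) acc (fun c' hc' => h c' (by simp [hc']))]
    simp

-- the round trip: splitting a ' '-join of nonempty whitespace-free words gives them back
lemma go_join (ws : List (List Char)) : ∀ (acc : List (List Char)),
    (∀ w ∈ ws, w ≠ [] ∧ ∀ c ∈ w, PySem.Chars.isspace c = false) →
    PySem.Chars.split₀.go (List.intercalate [' '] ws) [] acc = acc.reverse ++ ws := by
  induction ws with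
  | nil => intro acc _; rw [show List.intercalate [' '] ([] : List (List Char)) = [] from rfl, PySem.Chars.split₀.go.eq_def]; simp
  | cons w ws ih =>
    intro acc h
    have hw := h w (by simp)
    cases ws with
    | nil =>
      rw [ic_singleton]
      have hskip := go_skip w [] [] acc hw.2
      rw [List.append_nil] at hskip
      rw [hskip, PySem.Chars.split₀.go.eq_def]
      have h2 : (w.reverse ++ ([] : List Char)).isEmpty = false := by simpa using hw.1
      simp only [h2, Bool.false_eq_true, if_false]
      simp
    | cons w' ws' =>
      rw [ic_cons₂, List.append_assoc, go_skip w _ [] acc hw.2, List.singleton_append,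
        PySem.Chars.split₀.go.eq_def]
      have h1 : PySem.Chars.isspace ' ' = true := by decide
      have h2 : (w.reverse ++ ([] : List Char)).isEmpty = false := by simpa using hw.1
      simp only [h1, if_true, h2, Bool.false_eq_true, if_false, List.append_nil]
      rw [ih (w.reverse.reverse :: acc) (fun g hg => h g (by simp [hg]))]
      simp [hw.1]

lemma chars_roundtrip (ws : List (List Char))
    (h : ∀ w ∈ ws, w ≠ [] ∧ ∀ c ∈ w, PySem.Chars.isspace c = false) :
    PySem.Chars.split₀ (PySem.Chars.join [' '] ws) = ws := by
  show PySem.Chars.split₀.go (List.intercalate [' '] ws) [] [] = ws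
  rw [go_join ws [] h]; simp

lemma str_roundtrip (g : List String)
    (h : ∀ w ∈ g, w ≠ "" ∧ ∀ c ∈ w.toList, PySem.Chars.isspace c = false) :
    PySem.Str.split₀ (PySem.Str.join " " g) = g := by
  unfold PySem.Str.split₀
  rw [PySem.Str.toList_join]
  have : (" " : String).toList = [' '] := rfl
  rw [this, chars_roundtrip (g.map String.toList)]
  · simp [Function.comp_def]
  · intro w hw
    simp only [List.mem_map] at hw
    obtain ⟨x, hx, rfl⟩ := hw
    refine ⟨fun h' => (h x hx).1 ?_, (h x hx).2⟩
    exact String.toList_inj.mp (by simp [h'])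

-- intercalate distributes over ++ of nonempty lists of parts
lemma intercalate_append_ne (sep : List Char) (a : List (List Char)) :
    ∀ b : List (List Char), a ≠ [] → b ≠ [] →
    List.intercalate sep (a ++ b) = List.intercalate sep a ++ sep ++ List.intercalate sep b := by
  induction a with
  | nil => intro b ha _; exact absurd rfl ha
  | cons x a ih =>
    intro b _ hb
    cases a with
    | nil =>
      cases b with
      | nil => exact absurd rfl hb
      | cons y b => rw [List.singleton_append, ic_cons₂, ic_singleton]
    | cons x' a' =>
      have ihh := ih b (by simp) hb
      simp only [List.cons_append] at ihh ⊢
      rw [ic_cons₂, ic_cons₂, ihh]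
      simp [List.append_assoc]

-- joining the joined groups equals joining the concatenated words (groups list-nonempty)
lemma chars_join_flatten (l : List (List (List Char))) :
    (∀ g ∈ l, g ≠ []) →
    PySem.Chars.join [' '] (l.map (PySem.Chars.join [' '])) = PySem.Chars.join [' '] l.flatten := by
  induction l with
  | nil => intro _; rfl
  | cons g l ih =>
    intro h
    cases l with
    | nil => simp [PySem.Chars.join, ic_singleton]
    | cons g' l' =>
      have hflat : (g' :: l').flatten ≠ [] := by
        have := h g' (by simp)
        simp only [List.flatten_cons]
        intro hx
        exact this (List.append_eq_nil_iff.1 hx).1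
      have ihh := ih (fun x hx => h x (by simp [hx]))
      simp only [PySem.Chars.join, List.map_cons] at ihh ⊢
      rw [ic_cons₂, List.flatten_cons,
        intercalate_append_ne [' '] g _ (h g (by simp)) hflat, ihh]

lemma str_join_flatten (l : List (List String)) (h : ∀ g ∈ l, g ≠ []) :
    PySem.Str.join " " (l.map (PySem.Str.join " ")) = PySem.Str.join " " l.flatten := by
  apply String.toList_inj.mp
  rw [PySem.Str.toList_join, PySem.Str.toList_join]
  have hsep : (" " : String).toList = [' '] := rfl
  rw [hsep]
  have h1 : (l.map (PySem.Str.join " ")).map String.toList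
      = (l.map (fun g => g.map String.toList)).map (PySem.Chars.join [' ']) := by
    simp only [List.map_map]
    refine List.map_congr_left ?_
    intro g _
    simp [Function.comp_def, PySem.Str.toList_join, hsep]
  rw [h1, chars_join_flatten (l.map (fun g => g.map String.toList))
      (by intro g hg; simp only [List.mem_map] at hg; obtain ⟨x, hx, rfl⟩ := hg
          simpa using h x hx)]
  congr 1
  simp [List.map_flatten]

-- the raw comprehension '[i+1 for i,w in enumerate(words) if P(w)]' from offset k
def ctRaw (k : Nat) (ws : List String) : List Int :=
  ((PySem.List.enumerate ws (k : Int)).filter (fun p => ctP p.2)).map (fun p => p.1 + 1)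

-- the conditionally appended final index, as a function of the pending-group state
def ctTail (cs : List String) (k : Nat) (ws : List String) : List Int :=
  match ws.getLast? with
  | some w => if ctP w then [] else [((k + ws.length : Nat) : Int)]
  | none => if cs.isEmpty then [] else [((k : Nat) : Int)]

lemma raw_tail_cum (ws : List String) : ∀ (b : Nat) (cs : List String),
    ctRaw (b + cs.length) ws ++ ctTail cs (b + cs.length) ws = ctCum b (ctGroupsAux cs ws) := by
  induction ws with
  | nil =>
    intro b cs
    simp only [ctRaw, ctTail, ctGroupsAux, PySem.List.enumerate_nil, List.filter_nil, List.map_nil,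
      List.nil_append, List.getLast?_nil]
    by_cases h : cs.isEmpty
    · simp [h, ctCum]
    · have : cs ≠ [] := by simpa [List.isEmpty_iff] using h
      simp [h, ctCum]
  | cons w ws ih =>
    intro b cs
    have hraw : ctRaw (b + cs.length) (w :: ws)
        = (if ctP w then [((b + cs.length : Nat) : Int) + 1] else []) ++ ctRaw (b + cs.length + 1) ws := by
      simp only [ctRaw, PySem.List.enumerate_cons, List.filter_cons]
      by_cases h : ctP w = true
      · simp [h]
      · rw [Bool.not_eq_true] at h
        simp [h]
    have htail : ctTail cs (b + cs.length) (w :: ws)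
        = (if ctP w then ctTail [] (b + cs.length + 1) ws else ctTail (cs ++ [w]) (b + cs.length + 1) ws) := by
      cases hws : ws with
      | nil =>
        by_cases h : ctP w <;> simp [ctTail, h, Nat.add_comm]
      | cons w' ws' =>
        cases hls : (w' :: ws').getLast? with
        | none => simp [List.getLast?_eq_none_iff] at hls
        | some x =>
          simp only [ctTail, List.getLast?_cons_cons, hls]
          by_cases h : ctP w <;> by_cases hx : ctP x <;>
            simp [h, hx, Nat.add_assoc, Nat.add_comm 1]
    rw [hraw, htail]
    simp only [ctGroupsAux]
    by_cases h : ctP w = true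
    · simp only [h, if_true]
      have hih := ih (b + cs.length + 1) []
      simp only [List.length_nil, Nat.add_zero] at hih
      rw [List.append_assoc, hih]
      have h1 : b + (cs ++ [w]).length = b + cs.length + 1 := by
        rw [List.length_append, List.length_singleton, Nat.add_assoc]
      rw [show ctCum b ((cs ++ [w]) :: ctGroupsAux [] ws)
            = ((b + (cs ++ [w]).length : Nat) : Int) :: ctCum (b + (cs ++ [w]).length) (ctGroupsAux [] ws) from rfl,
          h1, List.singleton_append]
      norm_cast
    · rw [Bool.not_eq_true] at h
      simp only [h, Bool.false_eq_true, if_false]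
      have h1 : b + (cs ++ [w]).length = b + cs.length + 1 := by
        rw [List.length_append, List.length_singleton, Nat.add_assoc]
      rw [← h1]
      exact ih b (cs ++ [w])

lemma raw_append (k : Nat) (ys : List String) (w : String) :
    ctRaw k (ys ++ [w]) = ctRaw k ys ++ (if ctP w then [((k + ys.length : Nat) : Int) + 1] else []) := by
  simp only [ctRaw, PySem.List.enumerate_append, List.filter_append, List.map_append]
  congr 1
  simp only [PySem.List.enumerate_cons, PySem.List.enumerate_nil, List.filter_cons, List.filter_nil]
  by_cases h : ctP w = true
  · simp [h]
  · rw [Bool.not_eq_true] at h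
    simp [h]

lemma raw_mem_le (k : Nat) (ws : List String) (x : Int) (hx : x ∈ ctRaw k ws) :
    x ≤ (k : Int) + ws.length := by
  simp only [ctRaw, List.mem_map, List.mem_filter] at hx
  obtain ⟨p, ⟨hp, _⟩, rfl⟩ := hx
  rw [PySem.List.mem_enumerate_iff] at hp
  obtain ⟨j, hj, rfl⟩ := hp
  simp only
  push_cast
  omega

-- B's port computes exactly ctRaw 0 W ++ ctTail [] 0 W
lemma ends_eq (W : List String) :
    (if !(PySem.List.len W == 0) &&
        ((ctRaw 0 W).isEmpty || !(PySem.List.pyGet? (ctRaw 0 W) (-1) == some (PySem.List.len W)))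
      then ctRaw 0 W ++ [PySem.List.len W] else ctRaw 0 W) = ctRaw 0 W ++ ctTail [] 0 W := by
  rcases List.eq_nil_or_concat W with rfl | ⟨ys, w, rfl⟩
  · simp [ctRaw, ctTail, PySem.List.enumerate_nil]
  · simp only [List.concat_eq_append]
    rw [PySem.List.pyGet?_neg_one]
    have hlen : PySem.List.len (ys ++ [w]) = ((ys.length : Int) + 1) := by
      simp [PySem.List.len_eq]
    have hne : (PySem.List.len (ys ++ [w]) == 0) = false := by
      rw [hlen]; simp; omega
    rw [raw_append 0 ys w]
    by_cases h : ctP w = true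
    · have hgl : (ctRaw 0 ys ++ [((0 + ys.length : Nat) : Int) + 1]).getLast? = some ((ys.length : Int) + 1) := by
        rw [List.getLast?_append_of_ne_nil _ (by simp)]
        simp
      simp only [h, if_true, ctTail, List.getLast?_append_of_ne_nil _ (List.cons_ne_nil w []),
        List.getLast?_singleton, hne, Bool.false_eq_true, hgl, hlen]
      have hniE : (ctRaw 0 ys ++ [((0 + ys.length : Nat) : Int) + 1]).isEmpty = false := by simp
      simp [hniE, h]
    · rw [Bool.not_eq_true] at h
      have htail : ctTail [] 0 (ys ++ [w]) = [((ys.length : Int) + 1)] := by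
        simp only [ctTail, List.getLast?_append_of_ne_nil _ (List.cons_ne_nil w []),
          List.getLast?_singleton, h, Bool.false_eq_true, if_false]
        simp only [List.length_append, List.length_singleton]
        push_cast; ring
      simp only [h, Bool.false_eq_true, if_false, List.append_nil, htail, hne, Bool.not_false,
        Bool.true_and, hlen]
      by_cases he : (ctRaw 0 ys).isEmpty
      · simp [he]; omega
      · have hgl : ∀ x, (ctRaw 0 ys).getLast? = some x → x ≤ (ys.length : Int) := by
          intro x hx
          exact raw_mem_le 0 ys x (List.mem_of_getLast? hx) |>.trans_eq (by push_cast; ring)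
        cases hg : (ctRaw 0 ys).getLast? with
        | none => simp [he, hg]; omega
        | some x =>
          have : (x == (ys.length : Int) + 1) = false := by
            have := hgl x hg
            simp; omega
          simp [he, hg, this]; omega

-- the words that occur in the groups of split₀ text satisfy the round-trip hypotheses
lemma group_ok (text : String) (g : List String)
    (hg : g ∈ ctGroupsAux [] (PySem.Str.split₀ text)) :
    g ≠ [] ∧ PySem.Str.split₀ (PySem.Str.join " " g) = g := by
  refine ⟨groupsAux_ne_nil _ [] g hg, str_roundtrip g ?_⟩
  intro w hw
  have := groupsAux_mem _ [] g w hg hw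
  simp only [List.not_mem_nil, false_or] at this
  exact split0_words text w this

lemma flatten_ne_nil_of_mem {α : Type} (l : List (List α)) (h : ∀ g ∈ l, g ≠ []) (hl : l ≠ []) :
    l.flatten ≠ [] := by
  cases l with
  | nil => exact absurd rfl hl
  | cons g l =>
    have := h g (by simp)
    simp only [List.flatten_cons]
    intro hx
    exact this (List.append_eq_nil_iff.1 hx).1

lemma ctFinalizeA_eq_norm (chunk : List String) :
    ctFinalizeA chunk = ctNorm (PySem.Str.join " " chunk) := rfl

-- the core simultaneous-fold lemma: A's greedy packing of joined groups equals
-- B's index walk over the cumulative end positions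
lemma packFold (W : List String) (ml : Int) : ∀ (gs : List (List String)),
    ∀ (done : List (List String)) (chA : List String) (s : Nat),
    W.drop s = done.flatten ++ gs.flatten →
    s ≤ W.length →
    (∀ g ∈ done ++ gs, g ≠ [] ∧ PySem.Str.split₀ (PySem.Str.join " " g) = g) →
    ∃ (done' : List (List String)) (s' : Nat) (chA' : List String),
      (gs.map (PySem.Str.join " ")).foldl (ctPackStepA ml)
          (chA, done.map (PySem.Str.join " "), (done.flatten.length : Int))
        = (chA', done'.map (PySem.Str.join " "), (done'.flatten.length : Int)) ∧
      (ctCum (s + done.flatten.length) gs).foldl (ctBStep W ml)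
          (chA, (s : Int), ((s + done.flatten.length : Nat) : Int), (done.flatten.length : Int))
        = (chA', (s' : Int), ((s' + done'.flatten.length : Nat) : Int), (done'.flatten.length : Int)) ∧
      W.drop s' = done'.flatten ∧
      s' ≤ W.length ∧
      (∀ g ∈ done', g ≠ [] ∧ PySem.Str.split₀ (PySem.Str.join " " g) = g) ∧
      (done' = [] → done = [] ∧ gs = []) := by
  intro gs
  induction gs with
  | nil =>
    intro done chA s hdrop hs hok
    refine ⟨done, s, chA, rfl, ?_, by simpa using hdrop, hs,
      fun g hg => hok g (by simp [hg]), fun h => ⟨h, rfl⟩⟩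
    simp [ctCum]
  | cons g gs ih =>
    intro done chA s hdrop hs hok
    have hg := hok g (by simp)
    have hdone_ne : ∀ x ∈ done, x ≠ [] := fun x hx => (hok x (by simp [hx])).1
    have hlen1 : (W.drop s).length = done.flatten.length + (g.length + gs.flatten.length) := by
      rw [hdrop]; simp
    have hps : s + done.flatten.length ≤ W.length := by
      simp only [List.length_drop] at hlen1; omega
    have hdropp : W.drop (s + done.flatten.length) = g ++ gs.flatten := by
      rw [← List.drop_drop, hdrop, List.flatten_cons]
      exact List.drop_left
    have hslice : PySem.List.slice W (some ((s : Nat) : Int))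
        (some ((s + done.flatten.length : Nat) : Int)) = done.flatten := by
      rw [PySem.List.slice_natCast, hdrop]
      simp [List.take_left]
    have hep : ((s + done.flatten.length + g.length : Nat) : Int)
        - ((s + done.flatten.length : Nat) : Int) = (g.length : Int) := by push_cast; ring
    have hcnteq : (!((done.flatten.length : Int) == 0)) = !done.isEmpty := by
      by_cases hd : done = []
      · subst hd; simp
      · have h1 : done.flatten ≠ [] := flatten_ne_nil_of_mem _ hdone_ne hd
        have h2 : done.flatten.length ≠ 0 := fun hz => h1 (List.eq_nil_of_length_eq_zero hz)
        have h3 : (((done.flatten.length : Int)) == 0) = false :=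
          beq_eq_false_iff_ne.mpr (by exact_mod_cast h2)
        have h4 : done.isEmpty = false := by simp [hd]
        rw [h3, h4]
    have hcum : ctCum (s + done.flatten.length) (g :: gs)
        = ((s + done.flatten.length + g.length : Nat) : Int)
            :: ctCum (s + done.flatten.length + g.length) gs := rfl
    have hokA : ∀ x ∈ ([g] : List (List String)) ++ gs,
        x ≠ [] ∧ PySem.Str.split₀ (PySem.Str.join " " x) = x := by
      intro x hx
      simp only [List.mem_append, List.mem_singleton] at hx
      refine hok x ?_
      simp only [List.mem_append, List.mem_cons]
      rcases hx with rfl | hx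
      · exact Or.inr (Or.inl rfl)
      · exact Or.inr (Or.inr hx)
    have hokB : ∀ x ∈ (done ++ [g]) ++ gs,
        x ≠ [] ∧ PySem.Str.split₀ (PySem.Str.join " " x) = x := by
      intro x hx
      simp only [List.mem_append, List.mem_singleton] at hx
      refine hok x ?_
      simp only [List.mem_append, List.mem_cons]
      rcases hx with (hx | rfl) | hx
      · exact Or.inl hx
      · exact Or.inr (Or.inl rfl)
      · exact Or.inr (Or.inr hx)
    have hceA : (!(List.map (PySem.Str.join " ") done).isEmpty) = !done.isEmpty := by simp
    by_cases hcond : (decide ((done.flatten.length : Int) + (g.length : Int) > ml)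
        && !done.isEmpty) = true
    · -- flush in both programs
      have hdne : done ≠ [] := by
        simp only [Bool.and_eq_true, Bool.not_eq_eq_eq_not, Bool.not_true] at hcond
        simpa [List.isEmpty_iff] using hcond.2
      have hstepA : ctPackStepA ml (chA, done.map (PySem.Str.join " "),
            (done.flatten.length : Int)) (PySem.Str.join " " g)
          = (chA ++ [ctFinalizeA (done.map (PySem.Str.join " "))],
             [g].map (PySem.Str.join " "), (([g] : List (List String)).flatten.length : Int)) := by
        simp only [ctPackStepA, hg.2]
        rw [hceA, hcond]
        simp
      have hstepB : ctBStep W ml (chA, ((s : Nat) : Int), ((s + done.flatten.length : Nat) : Int),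
            (done.flatten.length : Int)) (((s + done.flatten.length + g.length : Nat) : Int))
          = (chA ++ [ctFinalizeA (done.map (PySem.Str.join " "))],
             ((s + done.flatten.length : Nat) : Int),
             ((s + done.flatten.length + g.length : Nat) : Int), (g.length : Int)) := by
        simp only [ctBStep, hep, hcnteq]
        rw [Bool.and_comm, hcond]
        simp only [if_true]
        rw [hslice, ← str_join_flatten done hdone_ne, ← ctFinalizeA_eq_norm]
      obtain ⟨done', s', chA', hA', hB', hdrop', hs', hok', hne'⟩ :=
        ih [g] (chA ++ [ctFinalizeA (done.map (PySem.Str.join " "))])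
          (s + done.flatten.length) (by simpa using hdropp) hps hokA
      refine ⟨done', s', chA', ?_, ?_, hdrop', hs', hok', fun h => absurd (hne' h).1 (by simp)⟩
      · rw [List.map_cons, List.foldl_cons, hstepA]
        exact hA'
      · rw [hcum, List.foldl_cons, hstepB]
        have hgl : (([g] : List (List String)).flatten.length) = g.length := by simp
        simp only [hgl] at hB'
        exact hB'
    · -- no flush in either program
      rw [Bool.not_eq_true] at hcond
      have hflatlen : ((done ++ [g]).flatten.length : Int)
          = (done.flatten.length : Int) + (g.length : Int) := by
        rw [List.flatten_append]
        push_cast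
        simp
      have hflatn : s + (done ++ [g]).flatten.length = s + done.flatten.length + g.length := by
        rw [List.flatten_append]
        simp [Nat.add_assoc]
      have hstepA : ctPackStepA ml (chA, done.map (PySem.Str.join " "),
            (done.flatten.length : Int)) (PySem.Str.join " " g)
          = (chA, (done ++ [g]).map (PySem.Str.join " "),
             ((done ++ [g]).flatten.length : Int)) := by
        simp only [ctPackStepA, hg.2]
        rw [hceA, hcond]
        simp only [Bool.false_eq_true, if_false]
        rw [hflatlen]
        simp
      have hstepB : ctBStep W ml (chA, ((s : Nat) : Int), ((s + done.flatten.length : Nat) : Int),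
            (done.flatten.length : Int)) (((s + done.flatten.length + g.length : Nat) : Int))
          = (chA, ((s : Nat) : Int), ((s + (done ++ [g]).flatten.length : Nat) : Int),
             (((done ++ [g]).flatten.length : Int))) := by
        simp only [ctBStep, hep, hcnteq]
        rw [Bool.and_comm, hcond]
        simp only [Bool.false_eq_true, if_false]
        rw [hflatlen, hflatn]
      obtain ⟨done', s', chA', hA', hB', hdrop', hs', hok', hne'⟩ :=
        ih (done ++ [g]) chA s
          (by rw [hdrop, List.flatten_cons, List.flatten_append]
              simp [List.append_assoc])
          hs hokB
      refine ⟨done', s', chA', ?_, ?_, hdrop', hs', hok',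
        fun h => absurd (hne' h).1 (by simp)⟩
      · rw [List.map_cons, List.foldl_cons, hstepA]
        exact hA'
      · rw [hcum, List.foldl_cons, hstepB]
        rw [hflatn] at hB' ⊢
        exact hB'

-- ===== VERDICT (by name: the statement is the Claim_ definition above) =====
theorem chunk_text_spec : Claim_equal_chunk_text := by
  intro text ml _
  unfold Spec_chunk_text chunk_text chunk_text_alt
  have hsent := sentFold (PySem.Str.split₀ text) [] []
  dsimp only at hsent ⊢
  simp only [List.nil_append] at hsent
  rw [hsent]
  have hends0 : ((PySem.List.enumerate (PySem.Str.split₀ text) 0).filter (fun p => ctP p.2)).map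
      (fun p => p.1 + 1) = ctRaw 0 (PySem.Str.split₀ text) := by
    simp [ctRaw]
  rw [hends0, ends_eq]
  have hcum0 := raw_tail_cum (PySem.Str.split₀ text) 0 []
  simp only [List.length_nil, Nat.add_zero] at hcum0
  rw [hcum0]
  obtain ⟨done', s', chA', hA, hB, hdrop', hs', hok', hne'⟩ :=
    packFold (PySem.Str.split₀ text) ml (ctGroupsAux [] (PySem.Str.split₀ text)) [] [] 0
      (by simp [groupsAux_flatten]) (by simp)
      (fun g hg => group_ok text g (by simpa using hg))
  simp only [List.map_nil, List.flatten_nil, List.length_nil, Nat.cast_zero, Nat.add_zero] at hA hB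
  rw [hA, hB]
  by_cases hW : PySem.Str.split₀ text = []
  · have hflat : done'.flatten = [] := by rw [← hdrop', hW, List.drop_nil]
    have hdone' : done' = [] := by
      rcases done' with _ | ⟨d, ds⟩
      · rfl
      · exact absurd hflat (flatten_ne_nil_of_mem _ (fun x hx => (hok' x hx).1) (by simp))
    subst hdone'
    simp [hW]
  · have hgs : ctGroupsAux [] (PySem.Str.split₀ text) ≠ [] := by
      intro h
      apply hW
      have h2 := groupsAux_flatten (PySem.Str.split₀ text) []
      rw [h] at h2
      simpa using h2.symm
    have hd'ne : done' ≠ [] := fun h => hgs (hne' h).2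
    have hguardA : ((done'.map (PySem.Str.join " ")).isEmpty) = false := by simp [hd'ne]
    have hguardB : (PySem.Str.split₀ text).isEmpty = false := by simp [hW]
    dsimp only
    rw [hguardA, hguardB]
    simp only [Bool.not_false, if_true]
    rw [PySem.List.slice_from_natCast, hdrop',
      ctFinalizeA_eq_norm, str_join_flatten done' (fun g hg => (hok' g hg).1)]
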